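-- pv_equiv track=rewrite | github.com/stanton182/fmhy-search-streamlit | fmhy-search.py | moveExactMatchesToFront
-- ===== SOURCE A (Python) =====
-- def checkMultiWordQueryContainedExactlyInLine(line, searchQuery):
--     if len(searchQuery.split(' ')) <= 1:
--         return False
--     return (searchQuery.lower() in line.lower())
--
-- def moveExactMatchesToFront(myList, searchQuery):
--     bumped = []
--     notBumped = []
--     for i in range(len(myList)):
--         if checkMultiWordQueryContainedExactlyInLine(myList[i], searchQuery):
--             bumped.append(myList[i])
--         else:
--             notBumped.append(myList[i])
--     return (bumped + notBumped)
-- ===== SOURCE B (Python) =====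
-- def checkMultiWordQueryContainedExactlyInLine(line, searchQuery):
--     if len(searchQuery.split(' ')) <= 1:
--         return False
--     return (searchQuery.lower() in line.lower())
--
-- def moveExactMatchesToFront(myList, searchQuery):
--     # stable sort: matched lines (key False) come first, each group keeps its order
--     return sorted(myList, key=lambda line: not checkMultiWordQueryContainedExactlyInLine(line, searchQuery))
-- ===== Notes on version B (the rewrite author's own statement) =====
-- stated objective: simpler
-- what changed: Replaces the two-accumulator partition loop with a single stable sort on the boolean key 'not matched', relying on sort stability to keep each group's original order.
import Mathlib
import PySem

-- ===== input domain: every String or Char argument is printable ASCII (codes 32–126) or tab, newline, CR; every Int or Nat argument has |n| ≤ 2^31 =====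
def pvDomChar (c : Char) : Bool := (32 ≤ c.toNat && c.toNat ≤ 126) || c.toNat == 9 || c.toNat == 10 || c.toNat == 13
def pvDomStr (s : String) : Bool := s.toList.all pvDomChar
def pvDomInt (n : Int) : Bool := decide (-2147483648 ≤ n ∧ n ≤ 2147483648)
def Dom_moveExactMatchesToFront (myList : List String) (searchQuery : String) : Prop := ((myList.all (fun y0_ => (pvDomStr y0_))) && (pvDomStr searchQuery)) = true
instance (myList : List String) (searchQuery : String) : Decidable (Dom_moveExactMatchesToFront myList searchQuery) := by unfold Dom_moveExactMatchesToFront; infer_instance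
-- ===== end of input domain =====

-- B replaces A's two-accumulator partition loop by a single stable sort on the
-- boolean key "not matched" (objective: simpler).


-- ===== PORT A =====
-- shared helper of both Pythons (identical in Source A and Source B)
def checkMultiWordQueryContainedExactlyInLine (line searchQuery : String) : Bool :=
  if ((PySem.Str.split? searchQuery " ").getD []).length ≤ 1 then false
  else PySem.Str.isIn (PySem.Str.lower searchQuery) (PySem.Str.lower line)

def moveExactMatchesToFront (myList : List String) (searchQuery : String) : List String :=
  let acc := myList.foldl
    (fun (acc : List String × List String) x =>
      if checkMultiWordQueryContainedExactlyInLine x searchQuery then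
        (acc.1 ++ [x], acc.2)
      else
        (acc.1, acc.2 ++ [x]))
    ([], [])
  acc.1 ++ acc.2

-- ===== PORT B =====
def moveExactMatchesToFront_alt (myList : List String) (searchQuery : String) : List String :=
  PySem.List.sorted myList
    (fun line => !checkMultiWordQueryContainedExactlyInLine line searchQuery) false

-- ===== PRECONDITION & SPEC =====
def Spec_moveExactMatchesToFront (myList : List String) (searchQuery : String) (out : List String) : Prop := out = moveExactMatchesToFront_alt myList searchQuery
instance (myList : List String) (searchQuery : String) (out : List String) : Decidable (Spec_moveExactMatchesToFront myList searchQuery out) := by unfold Spec_moveExactMatchesToFront; infer_instance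

-- ===== CLAIM (what is proved, stated in full; the proofs are below) =====
def Claim_equal_moveExactMatchesToFront : Prop := ∀ (myList : List String) (searchQuery : String), Dom_moveExactMatchesToFront myList searchQuery → Spec_moveExactMatchesToFront myList searchQuery (moveExactMatchesToFront myList searchQuery)

-- ===== LEMMAS AND PROOFS =====

-- Inserting x into a list F ++ T (F all key-false, T all key-true) with the
-- insertion-sort step on the Bool key puts x after F if its key is false,
-- and at the very end if its key is true.
theorem insertBy_bool_partition {α : Type} (k : α → Bool) (x : α) (F T : List α)
    (hF : ∀ y ∈ F, k y = false) (hT : ∀ y ∈ T, k y = true) :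
    PySem.List.insertBy (fun a b => decide (k a < k b)) x (F ++ T) =
      if k x then F ++ T ++ [x] else F ++ x :: T := by
  induction F with
  | nil =>
    simp only [List.nil_append]
    induction T with
    | nil => cases hx : k x <;> simp [PySem.List.insertBy]
    | cons y ys ih =>
      have hy : k y = true := hT y (by simp)
      cases hx : k x with
      | false =>
        simp [PySem.List.insertBy, hy, hx]
      | true =>
        have h1 := ih (fun z hz => hT z (by simp [hz]))
        rw [hx, if_pos rfl] at h1
        simp [PySem.List.insertBy, hy, hx, h1]
  | cons f fs ih =>
    have hf : k f = false := hF f (by simp)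
    have h1 := ih (fun z hz => hF z (by simp [hz]))
    cases hx : k x with
    | false =>
      rw [hx, if_neg (by simp)] at h1
      simp [PySem.List.insertBy, hf, hx, h1]
    | true =>
      rw [hx, if_pos rfl] at h1
      simp [PySem.List.insertBy, hf, hx, h1]

-- The B-side insertion-sort fold, started from a partitioned state, ends in the
-- partitioned state extended by the key-false / key-true elements of xs.
theorem foldl_insertBy_bool {α : Type} (k : α → Bool) (xs F T : List α)
    (hF : ∀ y ∈ F, k y = false) (hT : ∀ y ∈ T, k y = true) :
    xs.foldl (fun acc x => PySem.List.insertBy (fun a b => decide (k a < k b)) x acc) (F ++ T) =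
      (F ++ xs.filter (fun x => !k x)) ++ (T ++ xs.filter (fun x => k x)) := by
  induction xs generalizing F T with
  | nil => simp
  | cons x xs ih =>
    simp only [List.foldl_cons]
    rw [insertBy_bool_partition k x F T hF hT]
    cases hx : k x with
    | false =>
      rw [if_neg (by simp)]
      have h1 := ih (F ++ [x]) T
        (fun z hz => by rcases List.mem_append.1 hz with h | h
                        · exact hF z h
                        · simp at h; simpa [h] using hx)
        hT
      rw [show F ++ x :: T = (F ++ [x]) ++ T by simp, h1]
      simp [hx]
    | true =>
      rw [if_pos rfl]
      have h1 := ih F (T ++ [x]) hF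
        (fun z hz => by rcases List.mem_append.1 hz with h | h
                        · exact hT z h
                        · simp at h; simpa [h] using hx)
      rw [show F ++ T ++ [x] = F ++ (T ++ [x]) by simp, h1]
      simp [hx]

-- The A-side partition fold, started from (b, n), appends the matching
-- elements of xs to b and the non-matching ones to n.
theorem foldl_partition {α : Type} (p : α → Bool) (xs : List α) (b n : List α) :
    xs.foldl
      (fun (acc : List α × List α) x =>
        if p x then (acc.1 ++ [x], acc.2) else (acc.1, acc.2 ++ [x]))
      (b, n) =
      (b ++ xs.filter p, n ++ xs.filter (fun x => !p x)) := by
  induction xs generalizing b n with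
  | nil => simp
  | cons x xs ih =>
    simp only [List.foldl_cons]
    cases hx : p x with
    | false => simp [hx, ih]
    | true => simp [hx, ih]

-- ===== VERDICT (by name: the statement is the Claim_ definition above) =====
theorem moveExactMatchesToFront_spec : Claim_equal_moveExactMatchesToFront := by
  intro myList searchQuery _
  unfold Spec_moveExactMatchesToFront moveExactMatchesToFront moveExactMatchesToFront_alt
  rw [PySem.List.sorted_eq_foldl_insertBy]
  have hB := foldl_insertBy_bool
    (fun line => !checkMultiWordQueryContainedExactlyInLine line searchQuery)
    myList [] [] (by simp) (by simp)
  have hA := foldl_partition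
    (fun line => checkMultiWordQueryContainedExactlyInLine line searchQuery)
    myList [] []
  simp only [List.nil_append] at hB hA
  simp [hA, hB]
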